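-- pv_equiv track=rewrite | github.com/plettj/word-play-autosplitter | solver/solver.py | all_singles_efficient
-- ===== SOURCE A (Python) =====
-- from collections import Counter
--
-- HARD = set("xjqz")
--
-- SECO = set("kwfvhy")
--
-- def score_word(w):
--     return sum(7 if c in HARD else 3 if c in SECO else 1 for c in w)
--
-- def need_wild(wc, w):
--     return sum(max(cnt - wc.get(ch, 0), 0) for ch, cnt in Counter(w).items())
--
-- def can_spell(wc, wild, w):
--     return need_wild(wc, w) <= wild
--
-- def all_singles_efficient(wc, wild, words):
--     # prioritize 9-letter words first, then shorter lengths
--     candidates = [w for w in words if len(w) <= 9 and can_spell(wc, wild, w)]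
--     # bucket by length
--     buckets = {}
--     for w in candidates:
--         buckets.setdefault(len(w), []).append(w)
--     results = []
--     # lengths 9 down to 1
--     for length in range(9, 0, -1):
--         bucket = buckets.get(length, [])
--         # sort each by fewest wilds, then by hardness
--         bucket.sort(key=lambda w: (need_wild(wc, w), -score_word(w)))
--         results.extend(bucket)
--     return results
-- ===== SOURCE B (Python) =====
-- from collections import Counter
--
-- HARD = set("xjqz")
--
-- SECO = set("kwfvhy")
--
-- def score_word(w):
--     return sum(7 if c in HARD else 3 if c in SECO else 1 for c in w)
--
-- def need_wild(wc, w):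
--     return sum(max(cnt - wc.get(ch, 0), 0) for ch, cnt in Counter(w).items())
--
-- def can_spell(wc, wild, w):
--     return need_wild(wc, w) <= wild
--
-- def all_singles_efficient(wc, wild, words):
--     # keep spellable words of the playable lengths 1..9
--     candidates = [w for w in words if 1 <= len(w) <= 9 and can_spell(wc, wild, w)]
--     # two stable sorts: secondary key first, then primary (length descending)
--     candidates.sort(key=lambda w: (need_wild(wc, w), -score_word(w)))
--     candidates.sort(key=len, reverse=True)
--     return candidates
-- ===== Notes on version B (the rewrite author's own statement) =====
-- stated objective: simpler
-- what changed: Replaces the length-bucket dictionary and the 9-to-1 range loop (sorting each bucket separately) with two stable sorts of the whole candidate list: first by (need_wild, -score), then by length descending.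
import Mathlib
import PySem

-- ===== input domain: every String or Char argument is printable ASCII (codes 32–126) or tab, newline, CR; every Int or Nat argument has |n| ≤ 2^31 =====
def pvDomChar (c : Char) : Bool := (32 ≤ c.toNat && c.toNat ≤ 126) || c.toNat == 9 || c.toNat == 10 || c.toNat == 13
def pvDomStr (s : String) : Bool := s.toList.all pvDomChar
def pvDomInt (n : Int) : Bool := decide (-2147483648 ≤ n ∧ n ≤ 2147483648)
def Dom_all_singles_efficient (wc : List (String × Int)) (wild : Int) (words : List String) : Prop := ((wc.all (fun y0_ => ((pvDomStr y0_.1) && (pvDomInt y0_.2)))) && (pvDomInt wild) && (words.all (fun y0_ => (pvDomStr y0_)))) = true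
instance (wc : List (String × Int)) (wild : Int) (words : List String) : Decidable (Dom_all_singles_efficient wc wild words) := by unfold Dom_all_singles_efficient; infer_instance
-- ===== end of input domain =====

-- B replaces A's length-bucket dict and 9→1 range loop by two stable sorts of the whole
-- candidate list (secondary key first, then length descending): simpler, same results.

-- ===== PORT A =====
-- HARD / SECO, shared helpers of both versions
def pvHARD : List Char := ['x', 'j', 'q', 'z']
def pvSECO : List Char := ['k', 'w', 'f', 'v', 'h', 'y']

def score_word (w : String) : Int :=
  w.toList.foldl (fun s c => s + (if c ∈ pvHARD then 7 else if c ∈ pvSECO then 3 else 1)) 0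

-- Counter(w) iterates the characters of w as 1-character strings
def need_wild (wc : List (String × Int)) (w : String) : Int :=
  ((PySem.Dict.counter (w.toList.map (fun c => String.ofList [c]))).items).foldl
    (fun s p => s + max (p.2 - (PySem.Dict.ofList wc).getD p.1 0) 0) 0

def can_spell (wc : List (String × Int)) (wild : Int) (w : String) : Bool :=
  decide (need_wild wc w ≤ wild)

def all_singles_efficient (wc : List (String × Int)) (wild : Int) (words : List String) : List String :=
  let candidates := words.filter (fun w => decide (PySem.Str.len w ≤ 9) && can_spell wc wild w)
  let buckets := candidates.foldl
    (fun d w => d.modify (PySem.Str.len w) [] (fun b => b ++ [w])) (PySem.Dict.empty)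
  (PySem.List.pyRange 9 0 (-1)).foldl
    (fun results length =>
      results ++ PySem.List.sorted2 (buckets.getD length [])
        (fun w => need_wild wc w) (fun w => -(score_word w)) false) []

-- ===== PORT B =====
def all_singles_efficient_alt (wc : List (String × Int)) (wild : Int) (words : List String) : List String :=
  let candidates := words.filter (fun w =>
    decide (1 ≤ PySem.Str.len w) && (decide (PySem.Str.len w ≤ 9) && can_spell wc wild w))
  let c2 := PySem.List.sorted2 candidates (fun w => need_wild wc w) (fun w => -(score_word w)) false
  PySem.List.sorted c2 (fun w => PySem.Str.len w) true

-- ===== PRECONDITION & SPEC =====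
def Spec_all_singles_efficient (wc : List (String × Int)) (wild : Int) (words : List String) (out : List String) : Prop := out = all_singles_efficient_alt wc wild words
instance (wc : List (String × Int)) (wild : Int) (words : List String) (out : List String) : Decidable (Spec_all_singles_efficient wc wild words out) := by unfold Spec_all_singles_efficient; infer_instance

-- ===== CLAIM (what is proved, stated in full; the proofs are below) =====
def Claim_equal_all_singles_efficient : Prop := ∀ (wc : List (String × Int)) (wild : Int) (words : List String), Dom_all_singles_efficient wc wild words → Spec_all_singles_efficient wc wild words (all_singles_efficient wc wild words)

-- ===== LEMMAS AND PROOFS =====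

-- insertBy skips a block of elements it does not go before
theorem pv_insertBy_append_left {α : Type} (b : α → α → Bool) (x : α) (u v : List α)
    (h : ∀ y ∈ u, b x y = false) :
    PySem.List.insertBy b x (u ++ v) = u ++ PySem.List.insertBy b x v := by
  induction u with
  | nil => rfl
  | cons y u ih =>
    simp only [List.cons_append, PySem.List.insertBy, h y (by simp)]
    simp only [Bool.false_eq_true, if_false, List.cons.injEq, true_and]
    exact ih (fun z hz => h z (by simp [hz]))

-- insertBy goes in front of a block it goes before entirely
theorem pv_insertBy_all_before {α : Type} (b : α → α → Bool) (x : α) (zs : List α)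
    (h : ∀ z ∈ zs, b x z = true) :
    PySem.List.insertBy b x zs = x :: zs := by
  cases zs with
  | nil => rfl
  | cons z zs => simp [PySem.List.insertBy, h z (by simp)]

-- filtering commutes with a single (monotone-target) insertion
theorem pv_filter_insertBy {α : Type} (p : α → Bool) (b : α → α → Bool) (x : α) (ys : List α)
    (hmono : ys.Pairwise (fun y z => b x y = true → b x z = true)) :
    (PySem.List.insertBy b x ys).filter p
      = if p x then PySem.List.insertBy b x (ys.filter p) else ys.filter p := by
  induction ys with
  | nil => cases hpx : p x <;> simp [PySem.List.insertBy, List.filter, hpx]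
  | cons y ys ih =>
    rcases List.pairwise_cons.mp hmono with ⟨hy, hys⟩
    cases hbxy : b x y with
    | true =>
      have hall : ∀ z ∈ ys.filter p, b x z = true := by
        intro z hz
        exact hy z (List.mem_of_mem_filter hz) hbxy
      cases hpx : p x with
      | true =>
        cases hpy : p y with
        | true => simp [PySem.List.insertBy, hbxy, List.filter, hpx, hpy]
        | false =>
          have hall' : PySem.List.insertBy b x (ys.filter p) = x :: ys.filter p :=
            pv_insertBy_all_before b x _ hall
          simp [PySem.List.insertBy, hbxy, List.filter, hpx, hpy, hall']
      | false =>
        cases hpy : p y with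
        | true => simp [PySem.List.insertBy, hbxy, List.filter, hpx, hpy]
        | false => simp [PySem.List.insertBy, hbxy, List.filter, hpx, hpy]
    | false =>
      have ihh := ih hys
      cases hpy : p y with
      | true =>
        cases hpx : p x with
        | true => simp [PySem.List.insertBy, hbxy, List.filter, hpy, hpx, ihh]
        | false => simp [PySem.List.insertBy, hbxy, List.filter, hpy, hpx, ihh]
      | false =>
        cases hpx : p x with
        | true => simp [PySem.List.insertBy, hbxy, List.filter, hpy, hpx, ihh]
        | false => simp [PySem.List.insertBy, hbxy, List.filter, hpy, hpx, ihh]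

-- one insertion keeps the list b-sorted (b asymmetric and "negatively transitive")
theorem pv_insertBy_pairwise {α : Type} (b : α → α → Bool)
    (hasym : ∀ a c, b a c = true → b c a = false)
    (htr : ∀ x y z, b x y = true → b z y = false → b x z = true)
    (x : α) (ys : List α) (h : ys.Pairwise (fun y z => b z y = false)) :
    (PySem.List.insertBy b x ys).Pairwise (fun y z => b z y = false) := by
  induction ys with
  | nil => simp [PySem.List.insertBy]
  | cons y ys ih =>
    rcases List.pairwise_cons.mp h with ⟨hy, hys⟩
    cases hbxy : b x y with
    | true =>
      simp only [PySem.List.insertBy, hbxy, if_true]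
      refine List.pairwise_cons.mpr ⟨?_, h⟩
      intro z hz
      rcases List.mem_cons.mp hz with rfl | hz
      · exact hasym x z hbxy
      · exact hasym x z (htr x y z hbxy (hy z hz))
    | false =>
      simp only [PySem.List.insertBy, hbxy, Bool.false_eq_true, if_false]
      refine List.pairwise_cons.mpr ⟨?_, ih hys⟩
      intro z hz
      rcases (PySem.List.mem_insertBy b x z _).mp hz with rfl | hz
      · exact hbxy
      · exact hy z hz

theorem pv_filter_isort {α : Type} (p : α → Bool) (b : α → α → Bool)
    (hasym : ∀ a c, b a c = true → b c a = false)
    (htr : ∀ x y z, b x y = true → b z y = false → b x z = true)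
    (l : List α) :
    ∀ acc, acc.Pairwise (fun y z => b z y = false) →
      (l.foldl (fun acc x => PySem.List.insertBy b x acc) acc).filter p
        = (l.filter p).foldl (fun acc x => PySem.List.insertBy b x acc) (acc.filter p) := by
  induction l with
  | nil => intro acc _; rfl
  | cons x l ih =>
    intro acc h
    have hmono : acc.Pairwise (fun y z => b x y = true → b x z = true) :=
      h.imp (by intro y z hzy hxy; exact htr x y z hxy hzy)
    have hstep := pv_filter_insertBy p b x acc hmono
    cases hpx : p x with
    | true =>
      rw [List.foldl_cons, ih _ (pv_insertBy_pairwise b hasym htr x acc h), hstep, if_pos hpx,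
        List.filter_cons_of_pos hpx, List.foldl_cons]
    | false =>
      rw [List.foldl_cons, ih _ (pv_insertBy_pairwise b hasym htr x acc h), hstep,
        if_neg (by simp [hpx]), List.filter_cons_of_neg (by simp [hpx])]

-- the length-descending before-relation of B's outer sort
def pvBLen : String → String → Bool := fun a c => decide (PySem.Str.len c < PySem.Str.len a)

-- inserting into concatenated descending length classes appends to the element's own class
theorem pv_insertBy_flatMap_classes (Ls : List Int) (f : Int → List String) (x : String)
    (hdesc : Ls.Pairwise (· > ·)) (hmem : PySem.Str.len x ∈ Ls)
    (hf : ∀ L ∈ Ls, ∀ w ∈ f L, PySem.Str.len w = L) :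
    PySem.List.insertBy pvBLen x (Ls.flatMap f)
      = Ls.flatMap (fun L => if L = PySem.Str.len x then f L ++ [x] else f L) := by
  induction Ls with
  | nil => cases hmem
  | cons L Ls ih =>
    rcases List.pairwise_cons.mp hdesc with ⟨hL, hLs⟩
    by_cases hLx : L = PySem.Str.len x
    · have h1 : ∀ y ∈ f L, pvBLen x y = false := by
        intro y hy
        have hy' := hf L (by simp) y hy
        simp only [PySem.Str.len] at hy' hLx
        simp only [pvBLen, PySem.Str.len, decide_eq_false_iff_not]
        omega
      have h2 : ∀ z ∈ Ls.flatMap f, pvBLen x z = true := by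
        intro z hz
        rcases List.mem_flatMap.mp hz with ⟨M, hM, hzM⟩
        have hzlen := hf M (by simp [hM]) z hzM
        have hML : M < L := hL M hM
        simp only [PySem.Str.len] at hzlen hLx
        simp only [pvBLen, PySem.Str.len, decide_eq_true_eq]
        omega
      have h3 : (Ls.flatMap fun M => if M = PySem.Str.len x then f M ++ [x] else f M)
          = Ls.flatMap f :=
        List.flatMap_congr (fun M hM => by
          have hML : M < L := hL M hM
          rw [if_neg (by omega)])
      rw [List.flatMap_cons, pv_insertBy_append_left pvBLen x _ _ h1,
        pv_insertBy_all_before pvBLen x _ h2, List.flatMap_cons, if_pos hLx, h3]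
      simp
    · have hmem' : PySem.Str.len x ∈ Ls := by
        rcases List.mem_cons.mp hmem with h | h
        · exact absurd h.symm hLx
        · exact h
      have hgt : L > PySem.Str.len x := hL _ hmem'
      have h1 : ∀ y ∈ f L, pvBLen x y = false := by
        intro y hy
        have hy' := hf L (by simp) y hy
        simp only [PySem.Str.len] at hy' hgt
        simp only [pvBLen, PySem.Str.len, decide_eq_false_iff_not]
        omega
      rw [List.flatMap_cons, pv_insertBy_append_left pvBLen x _ _ h1,
        ih hLs hmem' (fun M hM w hw => hf M (by simp [hM]) w hw),
        List.flatMap_cons, if_neg hLx]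

-- the reverse sort by length is the concat of the length classes, 9 down to 1
theorem pv_isortRev_classes (s : List String)
    (hb : ∀ w ∈ s, 1 ≤ PySem.Str.len w ∧ PySem.Str.len w ≤ 9) :
    s.foldl (fun acc x => PySem.List.insertBy pvBLen x acc) []
      = ([9, 8, 7, 6, 5, 4, 3, 2, 1] : List Int).flatMap
          (fun L => s.filter (fun w => PySem.Str.len w == L)) := by
  induction s using List.reverseRecOn with
  | nil => simp
  | append_singleton s x ih =>
    have hb' : ∀ w ∈ s, 1 ≤ PySem.Str.len w ∧ PySem.Str.len w ≤ 9 := by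
      intro w hw; exact hb w (by simp [hw])
    have hx := hb x (by simp)
    rw [List.foldl_append, List.foldl_cons, List.foldl_nil, ih hb']
    have hmem : PySem.Str.len x ∈ ([9, 8, 7, 6, 5, 4, 3, 2, 1] : List Int) := by
      simp only [PySem.Str.len] at hx
      simp only [PySem.Str.len, List.mem_cons, List.not_mem_nil, or_false]
      omega
    rw [pv_insertBy_flatMap_classes _ _ x (by decide) hmem ?hf]
    case hf =>
      intro L _ w hw
      have := List.of_mem_filter hw
      simpa using this
    apply List.flatMap_congr
    intro L hL
    rw [List.filter_append]
    by_cases h : L = PySem.Str.len x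
    · rw [if_pos h, List.filter_cons_of_pos (by simp only [beq_iff_eq]; exact h.symm)]
      simp
    · rw [if_neg h, List.filter_cons_of_neg (by simp only [beq_iff_eq]; exact fun h' => h h'.symm)]
      simp

-- buckets.getD L [] is the length-L sublist of the candidates, in order
theorem pv_bucket_getD (l : List String) :
    ∀ (d : PySem.Dict Int (List String)) (L : Int),
      (l.foldl (fun d w => d.modify (PySem.Str.len w) [] (fun b => b ++ [w])) d).getD L []
        = d.getD L [] ++ l.filter (fun w => PySem.Str.len w == L) := by
  induction l with
  | nil => intro d L; simp
  | cons w l ih =>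
    intro d L
    rw [List.foldl_cons, ih, PySem.Dict.getD_modify]
    by_cases h : L = PySem.Str.len w
    · rw [if_pos h, ← h, List.filter_cons_of_pos (by simp only [beq_iff_eq]; exact h.symm)]
      simp
    · rw [if_neg h, List.filter_cons_of_neg (by simp only [beq_iff_eq]; exact fun h' => h h'.symm)]

-- the lexicographic before-relation of sorted2 (ascending, Int keys)
def pvBLex {α : Type} (k1 k2 : α → Int) : α → α → Bool :=
  fun a b => decide (k1 a < k1 b) || (!decide (k1 b < k1 a) && decide (k2 a < k2 b))

theorem pv_sorted2_def {α : Type} (xs : List α) (k1 k2 : α → Int) :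
    PySem.List.sorted2 xs k1 k2 false
      = xs.foldl (fun acc x => PySem.List.insertBy (pvBLex k1 k2) x acc) [] := rfl

theorem pv_blex_asym {α : Type} (k1 k2 : α → Int) :
    ∀ a c, pvBLex k1 k2 a c = true → pvBLex k1 k2 c a = false := by
  intro a c
  simp only [pvBLex, Bool.or_eq_true, Bool.and_eq_true, Bool.not_eq_true', decide_eq_true_eq,
    Bool.or_eq_false_iff, Bool.and_eq_false_iff, Bool.not_eq_false', decide_eq_false_iff_not,
    decide_eq_true_eq]
  omega

theorem pv_blex_tr {α : Type} (k1 k2 : α → Int) :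
    ∀ x y z, pvBLex k1 k2 x y = true → pvBLex k1 k2 z y = false → pvBLex k1 k2 x z = true := by
  intro x y z
  simp only [pvBLex, Bool.or_eq_true, Bool.and_eq_true, Bool.not_eq_true', decide_eq_true_eq,
    Bool.or_eq_false_iff, Bool.and_eq_false_iff, Bool.not_eq_false', decide_eq_false_iff_not,
    decide_eq_true_eq]
  omega

theorem pv_filter_sorted2 {α : Type} (p : α → Bool) (xs : List α) (k1 k2 : α → Int) :
    (PySem.List.sorted2 xs k1 k2 false).filter p
      = PySem.List.sorted2 (xs.filter p) k1 k2 false := by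
  rw [pv_sorted2_def, pv_sorted2_def]
  exact pv_filter_isort p (pvBLex k1 k2) (pv_blex_asym k1 k2) (pv_blex_tr k1 k2) xs []
    List.Pairwise.nil

-- the reverse sort by length, as the concat of the 9..1 length classes
theorem pv_sortedRev_len_classes (s : List String)
    (hb : ∀ w ∈ s, 1 ≤ PySem.Str.len w ∧ PySem.Str.len w ≤ 9) :
    PySem.List.sorted s (fun w => PySem.Str.len w) true
      = ([9, 8, 7, 6, 5, 4, 3, 2, 1] : List Int).flatMap
          (fun L => s.filter (fun w => PySem.Str.len w == L)) := by
  rw [PySem.List.sorted_rev_eq_foldl_insertBy]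
  exact pv_isortRev_classes s hb

-- restricting to one length class L ≥ 1 erases B's extra "length ≥ 1" filter
theorem pv_filter_len_eq (l : List String) (q : String → Bool) (L : Int) (h1L : 1 ≤ L) :
    (l.filter (fun w => q w)).filter (fun w => PySem.Str.len w == L)
      = (l.filter (fun w => decide (1 ≤ PySem.Str.len w) && q w)).filter
          (fun w => PySem.Str.len w == L) := by
  induction l with
  | nil => rfl
  | cons w l ih =>
    rw [List.filter_cons, List.filter_cons]
    cases hq : q w with
    | false =>
      rw [if_neg (by simp [hq]), if_neg (by simp [hq])]
      exact ih
    | true =>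
      cases h1 : decide (1 ≤ PySem.Str.len w) with
      | false =>
        have hlen : ¬((PySem.Str.len w == L) = true) := by
          simp only [decide_eq_false_iff_not, PySem.Str.len] at h1
          simp only [beq_iff_eq, PySem.Str.len]
          omega
        rw [if_pos (by simp [hq]), if_neg (by simp [h1]), List.filter_cons, if_neg hlen]
        exact ih
      | true =>
        rw [if_pos (by simp [hq]), if_pos (by simp [h1, hq]), List.filter_cons,
          List.filter_cons, ih]

-- ===== VERDICT (by name: the statement is the Claim_ definition above) =====
theorem all_singles_efficient_spec : Claim_equal_all_singles_efficient := by
  intro wc wild words _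
  unfold Spec_all_singles_efficient
  simp only [all_singles_efficient, all_singles_efficient_alt]
  rw [show PySem.List.pyRange 9 0 (-1) = ([9, 8, 7, 6, 5, 4, 3, 2, 1] : List Int) from rfl]
  rw [PySem.List.foldl_append_eq_flatMap, List.nil_append]
  have hbucket : ∀ L : Int,
      ((words.filter (fun w => decide (PySem.Str.len w ≤ 9) && can_spell wc wild w)).foldl
        (fun d w => d.modify (PySem.Str.len w) [] (fun b => b ++ [w]))
        (PySem.Dict.empty)).getD L []
      = (words.filter (fun w => decide (PySem.Str.len w ≤ 9) && can_spell wc wild w)).filter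
          (fun w => PySem.Str.len w == L) := by
    intro L
    rw [pv_bucket_getD]
    simp
  simp only [hbucket]
  have hb2 : ∀ w ∈ PySem.List.sorted2
      (words.filter (fun w =>
        decide (1 ≤ PySem.Str.len w) && (decide (PySem.Str.len w ≤ 9) && can_spell wc wild w)))
      (fun w => need_wild wc w) (fun w => -(score_word w)) false,
      1 ≤ PySem.Str.len w ∧ PySem.Str.len w ≤ 9 := by
    intro w hw
    have hw' := (PySem.List.sorted2_perm _ _ _ _).mem_iff.mp hw
    have hp := List.of_mem_filter hw'
    simp only [Bool.and_eq_true, decide_eq_true_eq] at hp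
    exact ⟨hp.1, hp.2.1⟩
  rw [pv_sortedRev_len_classes _ hb2]
  refine List.flatMap_congr (fun L hL => ?_)
  have h1L : (1 : Int) ≤ L := by
    simp only [List.mem_cons, List.not_mem_nil, or_false] at hL
    rcases hL with rfl | rfl | rfl | rfl | rfl | rfl | rfl | rfl | rfl <;> norm_num
  rw [pv_filter_sorted2,
    pv_filter_len_eq words (fun w => decide (PySem.Str.len w ≤ 9) && can_spell wc wild w) L h1L]
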